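-- pv_equiv track=rewrite | github.com/Feltzem/Code | build_webmap.py | pick_layer
-- ===== SOURCE A (Python) =====
-- from typing import Optional, Tuple, List, Dict
--
-- def pick_layer(layers: List[str], include_keys: List[str]) -> Optional[str]:
--     keys = [k.lower() for k in include_keys]
--     for lyr in layers:
--         name = lyr.lower()
--         if all(k in name for k in keys):
--             return lyr
--     # fallback: any one key match
--     for lyr in layers:
--         name = lyr.lower()
--         if any(k in name for k in keys):
--             return lyr
--     return None
-- ===== SOURCE B (Python) =====
-- from typing import Optional, List
--
-- def pick_layer(layers: List[str], include_keys: List[str]) -> Optional[str]: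
--     keys = [k.lower() for k in include_keys]
--     fallback = None
--     for lyr in layers:
--         name = lyr.lower()
--         if all(k in name for k in keys):
--             return lyr
--         if fallback is None and any(k in name for k in keys):
--             fallback = lyr
--     return fallback
-- ===== Notes on version B (the rewrite author's own statement) =====
-- stated objective: simpler
-- what changed: Replaced A's two full passes over the layer list by a single pass that returns an all-match immediately and records the first any-match in a fallback variable returned at the end.
import Mathlib
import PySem

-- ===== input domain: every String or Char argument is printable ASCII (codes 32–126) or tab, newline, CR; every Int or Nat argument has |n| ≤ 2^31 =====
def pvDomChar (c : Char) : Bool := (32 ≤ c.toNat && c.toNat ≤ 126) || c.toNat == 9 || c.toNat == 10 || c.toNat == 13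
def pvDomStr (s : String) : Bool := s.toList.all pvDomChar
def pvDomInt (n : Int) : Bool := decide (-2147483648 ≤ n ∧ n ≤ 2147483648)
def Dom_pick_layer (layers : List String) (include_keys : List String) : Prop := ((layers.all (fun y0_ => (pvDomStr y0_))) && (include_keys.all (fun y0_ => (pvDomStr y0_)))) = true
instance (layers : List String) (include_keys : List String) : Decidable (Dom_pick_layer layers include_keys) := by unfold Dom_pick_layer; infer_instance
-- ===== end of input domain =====

-- B changes the decomposition: one pass with a fallback variable instead of A's two passes (same result, one traversal).

-- ===== PORT A =====
-- all(k in name for k in keys)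
def pvAllIn (keys : List String) (name : String) : Bool :=
  keys.all (fun k => PySem.Str.isIn k name)

-- any(k in name for k in keys)
def pvAnyIn (keys : List String) (name : String) : Bool :=
  keys.any (fun k => PySem.Str.isIn k name)

-- first loop: return first layer whose lowered name contains all keys
def pvFindAll (keys : List String) : List String → Option String
  | [] => none
  | lyr :: rest =>
    if pvAllIn keys (PySem.Str.lower lyr) then some lyr else pvFindAll keys rest

-- second loop: return first layer whose lowered name contains any key
def pvFindAny (keys : List String) : List String → Option String
  | [] => none
  | lyr :: rest =>
    if pvAnyIn keys (PySem.Str.lower lyr) then some lyr else pvFindAny keys rest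

def pick_layer (layers : List String) (include_keys : List String) : Option String :=
  let keys := include_keys.map (fun k => PySem.Str.lower k)
  match pvFindAll keys layers with
  | some lyr => some lyr
  | none =>
    match pvFindAny keys layers with
    | some lyr => some lyr
    | none => none

-- ===== PORT B =====
-- single pass: return an all-match immediately; keep first any-match as fallback
def pvGo (keys : List String) : List String → Option String → Option String
  | [], fallback => fallback
  | lyr :: rest, fallback =>
    let name := PySem.Str.lower lyr
    if pvAllIn keys name then some lyr
    else pvGo keys rest
      (if fallback.isNone && pvAnyIn keys name then some lyr else fallback)

def pick_layer_alt (layers : List String) (include_keys : List String) : Option String :=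
  let keys := include_keys.map (fun k => PySem.Str.lower k)
  pvGo keys layers none

-- ===== PRECONDITION & SPEC =====
def Spec_pick_layer (layers : List String) (include_keys : List String) (out : Option String) : Prop := out = pick_layer_alt layers include_keys
instance (layers : List String) (include_keys : List String) (out : Option String) : Decidable (Spec_pick_layer layers include_keys out) := by unfold Spec_pick_layer; infer_instance

-- ===== CLAIM (what is proved, stated in full; the proofs are below) =====
def Claim_equal_pick_layer : Prop := ∀ (layers : List String) (include_keys : List String), Dom_pick_layer layers include_keys → Spec_pick_layer layers include_keys (pick_layer layers include_keys)

-- ===== LEMMAS AND PROOFS =====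

-- invariant of B's single pass: an all-match wins, else the fallback, else the first any-match
lemma pvGo_eq (keys : List String) (layers : List String) (fb : Option String) :
    pvGo keys layers fb =
      match pvFindAll keys layers with
      | some lyr => some lyr
      | none =>
        match fb with
        | some f => some f
        | none => pvFindAny keys layers := by
  induction layers generalizing fb with
  | nil => cases fb <;> simp [pvGo, pvFindAll, pvFindAny]
  | cons lyr rest ih =>
    by_cases hall : pvAllIn keys (PySem.Str.lower lyr) = true
    · simp [pvGo, pvFindAll, hall]
    · simp only [pvGo, pvFindAll, pvFindAny, hall, Bool.false_eq_true, if_false, ih]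
      cases fb with
      | some f => simp
      | none =>
        by_cases hany : pvAnyIn keys (PySem.Str.lower lyr) = true <;>
          simp [hany]

-- ===== VERDICT (by name: the statement is the Claim_ definition above) =====
theorem pick_layer_spec : Claim_equal_pick_layer := by
  intro layers include_keys _
  unfold Spec_pick_layer pick_layer pick_layer_alt
  rw [pvGo_eq]
  cases h1 : pvFindAll (include_keys.map (fun k => PySem.Str.lower k)) layers <;>
    cases h2 : pvFindAny (include_keys.map (fun k => PySem.Str.lower k)) layers <;>
      simp [h1, h2]
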